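-- pv_equiv track=rewrite | github.com/VavdiG14/Tetris | tabelakock.py | napisivserotac
-- ===== SOURCE A (Python) =====
-- def rotacijavdesno(koor):
--         nove_koordnate=[]
--         for tocke in koor:
--             x=tocke[0]
--             y=tocke[1]
--             nove_koordnate.append((-y,x))
--         return nove_koordnate
--
-- def napisivserotac(sez):
--     mnozica=[]
--     prva=sez[0]
--     mnozica.append(prva)
--     nove = rotacijavdesno(prva)
--     for i in range(5):
--         if nove not in mnozica:
--             mnozica.append(nove)
--         nove=rotacijavdesno(nove)
--     return list(mnozica)
-- ===== SOURCE B (Python) =====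
-- def rotacijavdesno(koor):
--     return [(-y, x) for x, y in koor]
--
-- def napisivserotac(sez):
--     prva = sez[0]
--     rez = [prva]
--     nove = rotacijavdesno(prva)
--     while nove != prva:
--         rez.append(nove)
--         nove = rotacijavdesno(nove)
--     return rez
-- ===== Notes on version B (the rewrite author's own statement) =====
-- stated objective: simpler
-- what changed: B keeps no seen-list and no fixed 5-step loop: it appends rotations in a while loop and stops as soon as the rotation cycles back to the first shape (R^4 = identity guarantees termination), so the membership-deduplication disappears.
import Mathlib
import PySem

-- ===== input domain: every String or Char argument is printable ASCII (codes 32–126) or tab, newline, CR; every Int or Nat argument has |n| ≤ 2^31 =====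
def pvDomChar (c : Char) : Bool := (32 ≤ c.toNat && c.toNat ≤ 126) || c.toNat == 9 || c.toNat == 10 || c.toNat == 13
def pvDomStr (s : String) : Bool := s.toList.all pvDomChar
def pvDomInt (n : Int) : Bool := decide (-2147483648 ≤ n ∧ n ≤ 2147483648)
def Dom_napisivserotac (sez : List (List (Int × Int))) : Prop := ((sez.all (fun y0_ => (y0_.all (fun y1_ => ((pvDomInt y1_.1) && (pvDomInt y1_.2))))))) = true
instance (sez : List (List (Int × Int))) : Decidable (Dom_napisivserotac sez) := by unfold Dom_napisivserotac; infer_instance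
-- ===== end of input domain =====

-- B replaces A's fixed 5-iteration loop with seen-list deduplication by a while loop that
-- stops when the rotation cycles back to the first element (objective: simpler).

-- ===== PORT A =====
-- helper rotacijavdesno: appends (-y, x) for each point, as the Python does
def rotacijavdesno (koor : List (Int × Int)) : List (Int × Int) :=
  koor.foldl (fun acc tocke => acc ++ [(-tocke.2, tocke.1)]) []

def napisivserotac (sez : List (List (Int × Int))) : List (List (Int × Int)) :=
  match sez with
  | [] => []            -- sez[0] raises IndexError in Python; excluded by Pre_
  | prva :: _ =>
    let mnozica : List (List (Int × Int)) := [prva]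
    let nove := rotacijavdesno prva
    let st := (PySem.List.pyRange 0 5 1).foldl
      (fun (s : List (List (Int × Int)) × List (Int × Int)) _ =>
        ((if s.2 ∈ s.1 then s.1 else s.1 ++ [s.2]), rotacijavdesno s.2))
      (mnozica, nove)
    st.1

-- ===== PORT B =====
-- B's rotation helper: a comprehension, i.e. a map
def rotacijavdesnoB (koor : List (Int × Int)) : List (Int × Int) :=
  koor.map (fun t => (-t.2, t.1))

-- B's while loop; the fuel only makes the same computation total (rotation returns to prva
-- after at most 4 steps, so fuel 4 is never exhausted on the loop's actual runs)
def altLoop (prva : List (Int × Int)) :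
    Nat → List (Int × Int) → List (List (Int × Int)) → List (List (Int × Int))
  | 0, _, acc => acc
  | fuel + 1, nove, acc =>
    if nove = prva then acc else altLoop prva fuel (rotacijavdesnoB nove) (acc ++ [nove])

def napisivserotac_alt (sez : List (List (Int × Int))) : List (List (Int × Int)) :=
  match sez with
  | [] => []            -- sez[0] raises IndexError in Python; excluded by Pre_
  | prva :: _ => altLoop prva 4 (rotacijavdesnoB prva) [prva]

-- ===== PRECONDITION & SPEC =====
-- A raises IndexError on the empty list (sez[0]); Pre_ excludes exactly that input.
def Pre_napisivserotac (sez : List (List (Int × Int))) : Prop := sez ≠ []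
instance (sez : List (List (Int × Int))) : Decidable (Pre_napisivserotac sez) := by unfold Pre_napisivserotac; infer_instance
def pvWitness_napisivserotac : (List (List (Int × Int))) := [[(0, 1), (2, 3)]]

def Spec_napisivserotac (sez : List (List (Int × Int))) (out : List (List (Int × Int))) : Prop := out = napisivserotac_alt sez
instance (sez : List (List (Int × Int))) (out : List (List (Int × Int))) : Decidable (Spec_napisivserotac sez out) := by unfold Spec_napisivserotac; infer_instance

-- ===== CLAIM (what is proved, stated in full; the proofs are below) =====
def Claim_equal_napisivserotac : Prop := ∀ (sez : List (List (Int × Int))), Dom_napisivserotac sez → Pre_napisivserotac sez → Spec_napisivserotac sez (napisivserotac sez)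

-- ===== LEMMAS AND PROOFS =====

-- A's foldl-append rotation equals B's map rotation
theorem rot_eq_map (koor : List (Int × Int)) : rotacijavdesno koor = rotacijavdesnoB koor := by
  induction koor with
  | nil => rfl
  | cons h t ih =>
    simp [rotacijavdesno, rotacijavdesnoB] at ih ⊢
    exact ih

-- four right-rotations are the identity
theorem rot4 (p : List (Int × Int)) :
    rotacijavdesnoB (rotacijavdesnoB (rotacijavdesnoB (rotacijavdesnoB p))) = p := by
  induction p with
  | nil => rfl
  | cons h t ih => simp [rotacijavdesnoB] at ih ⊢; exact ih

-- the rotation is injective (via rot4)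
theorem rot_inj {a b : List (Int × Int)} (h : rotacijavdesnoB a = rotacijavdesnoB b) : a = b := by
  have h3 := congrArg (fun x => rotacijavdesnoB (rotacijavdesnoB (rotacijavdesnoB x))) h
  simp only at h3
  rw [rot4 a, rot4 b] at h3
  exact h3

-- ===== VERDICT (by name: the statement is the Claim_ definition above) =====
theorem napisivserotac_spec : Claim_equal_napisivserotac := by
  intro sez _ hpre
  unfold Spec_napisivserotac
  match sez with
  | [] => exact absurd rfl hpre
  | prva :: rest =>
    have h4 := rot4 prva
    by_cases h1 : rotacijavdesnoB prva = prva
    · simp [napisivserotac, napisivserotac_alt, altLoop, PySem.List.pyRange, List.range_succ,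
            rot_eq_map, h1]
    · by_cases h2 : rotacijavdesnoB (rotacijavdesnoB prva) = prva
      · simp [napisivserotac, napisivserotac_alt, altLoop, PySem.List.pyRange, List.range_succ,
              rot_eq_map, h1, h2]
      · have n21 : rotacijavdesnoB (rotacijavdesnoB prva) ≠ rotacijavdesnoB prva :=
          fun h => h1 (rot_inj h)
        have n3p : rotacijavdesnoB (rotacijavdesnoB (rotacijavdesnoB prva)) ≠ prva := by
          intro h
          apply h1
          have := congrArg rotacijavdesnoB h
          rw [h4] at this
          exact this.symm
        have n31 : rotacijavdesnoB (rotacijavdesnoB (rotacijavdesnoB prva)) ≠ rotacijavdesnoB prva :=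
          fun h => h2 (rot_inj h)
        have n32 : rotacijavdesnoB (rotacijavdesnoB (rotacijavdesnoB prva)) ≠
            rotacijavdesnoB (rotacijavdesnoB prva) := fun h => n21 (rot_inj h)
        simp [napisivserotac, napisivserotac_alt, altLoop, PySem.List.pyRange, List.range_succ,
              rot_eq_map, h1, h2, h4, n21, n3p, n31, n32]
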